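-- pv_equiv track=rewrite | github.com/ajarac/advent_of_code | 2015/day05/solution.py | is_nice_string2
-- ===== SOURCE A (Python) =====
-- def is_nice_string2(string: str) -> bool:
--     double_letter = False
--     hash_map = {}
--     double_pair = False
--     for i, c in enumerate(string):
--         if i > 0:
--             pair = string[i - 1: i + 1]
--             if pair not in hash_map:
--                 hash_map[pair] = i
--             elif abs(hash_map[pair] - i) > 1:
--                 double_pair = True
--         if i > 1:
--             if string[i - 2] == string[i]:
--                 double_letter = True
--     return double_letter and double_pair
-- ===== SOURCE B (Python) =====
-- def is_nice_string2(string: str) -> bool: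
--     has_pair = any(string[i:i + 2] in string[i + 2:] for i in range(len(string) - 1))
--     has_repeat = any(string[i] == string[i + 2] for i in range(len(string) - 2))
--     return has_pair and has_repeat
-- ===== Notes on version B (the rewrite author's own statement) =====
-- stated objective: idiomatic
-- what changed: A's single fused loop maintaining a first-seen-index hash map of pairs is replaced by two independent scans: substring search (string[i:i+2] in string[i+2:]) for the non-overlapping-pair rule and a direct index scan for the repeat-with-gap rule.
import Mathlib
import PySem

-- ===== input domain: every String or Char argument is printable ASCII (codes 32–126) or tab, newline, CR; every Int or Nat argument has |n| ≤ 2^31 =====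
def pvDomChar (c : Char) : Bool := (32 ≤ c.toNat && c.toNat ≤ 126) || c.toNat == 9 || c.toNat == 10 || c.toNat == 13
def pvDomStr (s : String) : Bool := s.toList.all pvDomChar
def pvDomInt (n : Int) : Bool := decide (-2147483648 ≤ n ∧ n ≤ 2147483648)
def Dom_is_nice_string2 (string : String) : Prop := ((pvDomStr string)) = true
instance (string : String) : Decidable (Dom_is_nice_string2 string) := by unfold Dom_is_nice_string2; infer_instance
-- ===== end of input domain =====

-- B replaces A's single fused loop with a first-seen-index hash map by two independent scans
-- (substring search for the non-overlapping pair rule, a direct index scan for the repeat-with-gap rule): more idiomatic.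

-- ===== PORT A =====
def niceStep (cs : List Char) (st : Bool × PySem.Dict (List Char) Int × Bool)
    (ic : Int × Char) : Bool × PySem.Dict (List Char) Int × Bool :=
  let i := ic.1
  let hd :=
    if 0 < i then
      let pair := PySem.List.slice cs (some (i - 1)) (some (i + 1))
      match st.2.1.get? pair with
      | none => (st.2.1.insert pair i, st.2.2)
      | some v => if 1 < |v - i| then (st.2.1, true) else (st.2.1, st.2.2)
    else (st.2.1, st.2.2)
  let dl' := if 1 < i then (if PySem.List.pyGet? cs (i - 2) == some ic.2 then true else st.1) else st.1
  (dl', hd.1, hd.2)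

def is_nice_string2 (string : String) : Bool :=
  let cs := string.toList
  let st := (PySem.List.enumerate cs 0).foldl (niceStep cs) (false, PySem.Dict.empty, false)
  st.1 && st.2.2

-- ===== PORT B =====
def is_nice_string2_alt (string : String) : Bool :=
  let cs := string.toList
  let n := cs.length
  let has_pair := (List.range (n - 1)).any fun i =>
    PySem.Chars.isIn (PySem.List.slice cs (some (i : Int)) (some ((i : Int) + 2)))
      (PySem.List.slice cs (some ((i : Int) + 2)) none)
  let has_repeat := (List.range (n - 2)).any fun i =>
    PySem.List.pyGet? cs (i : Int) == PySem.List.pyGet? cs ((i : Int) + 2)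
  has_pair && has_repeat

-- ===== PRECONDITION & SPEC =====
def Spec_is_nice_string2 (string : String) (out : Bool) : Prop := out = is_nice_string2_alt string
instance (string : String) (out : Bool) : Decidable (Spec_is_nice_string2 string out) := by unfold Spec_is_nice_string2; infer_instance

-- ===== CLAIM (what is proved, stated in full; the proofs are below) =====
def Claim_equal_is_nice_string2 : Prop := ∀ (string : String), Dom_is_nice_string2 string → Spec_is_nice_string2 string (is_nice_string2 string)

-- ===== LEMMAS AND PROOFS =====

-- the pair of characters starting at index a
def prAt (cs : List Char) (a : Nat) : List Char := (cs.drop a).take 2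

-- "some i with i+2 < m has cs[i] = cs[i+2]" (A's double_letter after processing indices < m)
def RepB (cs : List Char) (m : Nat) : Prop := ∃ k, k + 2 < m ∧ cs[k]? = cs[k+2]?

-- "two equal non-overlapping pairs, both ending before index m" (A's double_pair)
def PairB (cs : List Char) (m : Nat) : Prop :=
  ∃ a b, a + 2 ≤ b ∧ b + 2 ≤ m ∧ prAt cs a = prAt cs b

-- invariant of A's hash map after processing indices < m: every stored value is the
-- first ending index of its pair, and every pair ending before m is stored
def DInv (cs : List Char) (m : Nat) (hm : PySem.Dict (List Char) Int) : Prop :=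
  (∀ p v, hm.get? p = some v →
    ∃ j : Nat, v = (j : Int) ∧ 1 ≤ j ∧ j < m ∧ prAt cs (j - 1) = p ∧
      ∀ j', 1 ≤ j' → j' < j → prAt cs (j' - 1) ≠ p)
  ∧ (∀ j : Nat, 1 ≤ j → j < m → (hm.get? (prAt cs (j - 1))).isSome)

def AStInv (cs : List Char) (m : Nat) (st : Bool × PySem.Dict (List Char) Int × Bool) : Prop :=
  (st.1 = true ↔ RepB cs m) ∧ DInv cs m st.2.1 ∧ (st.2.2 = true ↔ PairB cs m)

lemma prAt_len (cs : List Char) (a : Nat) (h : a + 2 ≤ cs.length) : (prAt cs a).length = 2 := by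
  simp [prAt]; omega

lemma prAt_prefix (cs : List Char) (a b : Nat) (ha : a + 2 ≤ cs.length) :
    prAt cs a <+: cs.drop b ↔ prAt cs a = prAt cs b := by
  rw [List.prefix_iff_eq_take, prAt_len cs a ha]; exact Iff.rfl

lemma prAt_eq_len (cs : List Char) (a b : Nat) (ha : a + 2 ≤ cs.length)
    (h : prAt cs a = prAt cs b) : b + 2 ≤ cs.length := by
  have := prAt_len cs a ha
  rw [h] at this; simp [prAt] at this; omega

lemma dl_step (cs : List Char) (m : Nat) (hmn : m < cs.length) (dl : Bool)
    (hdl : dl = true ↔ RepB cs m) :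
    ((if 1 < (m:Int) then (if PySem.List.pyGet? cs ((m:Int) - 2) == some cs[m] then true else dl) else dl) = true)
      ↔ RepB cs (m+1) := by
  by_cases h1 : 1 < m
  · rw [if_pos (by exact_mod_cast h1)]
    have hg : PySem.List.pyGet? cs ((m:Int) - 2) = cs[m-2]? := by
      rw [show ((m:Int)-2) = ((m-2:Nat):Int) by omega, PySem.List.pyGet?_natCast]
    rw [hg]
    by_cases heq : cs[m-2]? = some cs[m]
    · simp only [heq, beq_self_eq_true, if_true, true_iff]
      exact ⟨m-2, by omega, by rw [show m-2+2 = m by omega, heq, List.getElem?_eq_getElem hmn]⟩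
    · rw [show (cs[m-2]? == some cs[m]) = false by simpa using heq]
      simp only [Bool.false_eq_true, if_false, hdl]
      constructor
      · rintro ⟨k, hk, he⟩; exact ⟨k, by omega, he⟩
      · rintro ⟨k, hk, he⟩
        rcases Nat.lt_or_ge (k+2) m with h | h
        · exact ⟨k, h, he⟩
        · have hk2 : k + 2 = m := by omega
          exfalso; apply heq
          have : k = m - 2 := by omega
          rw [← this, he, show k+2 = m from hk2, List.getElem?_eq_getElem hmn]
  · rw [if_neg (by exact_mod_cast h1), hdl]
    constructor <;> rintro ⟨k, hk, _⟩ <;> exact absurd hk (by omega)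

lemma slice_pair (cs : List Char) (m : Nat) (h0 : 0 < m) :
    PySem.List.slice cs (some ((m:Int) - 1)) (some ((m:Int) + 1)) = prAt cs (m-1) := by
  rw [show ((m:Int) - 1) = ((m-1:Nat):Int) by omega, show ((m:Int) + 1) = ((m+1:Nat):Int) by omega,
     PySem.List.slice_natCast, show (m+1) - (m-1) = 2 by omega]; rfl

lemma hd_step (cs : List Char) (m : Nat) (hm : PySem.Dict (List Char) Int) (dp : Bool)
    (hD : DInv cs m hm) (hdp : dp = true ↔ PairB cs m) :
    DInv cs (m+1)
      (if 0 < (m:Int) then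
        (match hm.get? (PySem.List.slice cs (some ((m:Int) - 1)) (some ((m:Int) + 1))) with
        | none => (hm.insert (PySem.List.slice cs (some ((m:Int) - 1)) (some ((m:Int) + 1))) (m:Int), dp)
        | some v => if 1 < |v - (m:Int)| then (hm, true) else (hm, dp))
       else (hm, dp)).1
    ∧ ((if 0 < (m:Int) then
        (match hm.get? (PySem.List.slice cs (some ((m:Int) - 1)) (some ((m:Int) + 1))) with
        | none => (hm.insert (PySem.List.slice cs (some ((m:Int) - 1)) (some ((m:Int) + 1))) (m:Int), dp)
        | some v => if 1 < |v - (m:Int)| then (hm, true) else (hm, dp))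
       else (hm, dp)).2 = true ↔ PairB cs (m+1)) := by
  obtain ⟨hD1, hD2⟩ := hD
  by_cases h0 : 0 < m
  case neg =>
    rw [if_neg (by exact_mod_cast h0)]
    have hm0 : m = 0 := by omega
    subst hm0
    refine ⟨⟨fun p v hv => ?_, fun j hj1 hj2 => ?_⟩, ?_⟩
    · obtain ⟨j, h⟩ := hD1 p v hv; exact ⟨j, h.1, h.2.1, by omega, h.2.2.2⟩
    · omega
    · rw [hdp]
      constructor <;> rintro ⟨a, b, hab, hbm, heq⟩ <;> exact absurd hbm (by omega)
  case pos =>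
  rw [if_pos (by exact_mod_cast h0), slice_pair cs m h0]
  rcases hget : hm.get? (prAt cs (m-1)) with _ | v
  · -- fresh pair: insert
    refine ⟨⟨fun p v hv => ?_, fun j hj1 hj2 => ?_⟩, ?_⟩
    · rw [PySem.Dict.get?_insert] at hv
      by_cases hp : p = prAt cs (m-1)
      · rw [if_pos hp] at hv
        refine ⟨m, (Option.some.inj hv).symm, h0, by omega, hp.symm, fun j' h1 h2 hpr => ?_⟩
        have := hD2 j' h1 h2
        rw [hpr, hp, hget] at this
        simp at this
      · rw [if_neg hp] at hv
        obtain ⟨j, h⟩ := hD1 p v hv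
        exact ⟨j, h.1, h.2.1, by omega, h.2.2.2⟩
    · rw [PySem.Dict.get?_insert]
      by_cases hp : prAt cs (j-1) = prAt cs (m-1)
      · rw [if_pos hp]; rfl
      · have hjm : j ≠ m := fun h => hp (by rw [h])
        rw [if_neg hp]
        exact hD2 j hj1 (by omega)
    · rw [hdp]
      constructor
      · rintro ⟨a, b, hab, hbm, heq⟩; exact ⟨a, b, hab, by omega, heq⟩
      · rintro ⟨a, b, hab, hbm, heq⟩
        rcases Nat.lt_or_ge (b + 2) (m + 1) with h | h
        · exact ⟨a, b, hab, by omega, heq⟩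
        · have hb : b = m - 1 := by omega
          have := hD2 (a + 1) (by omega) (by omega)
          rw [Nat.add_sub_cancel, heq, hb, hget] at this
          simp at this
  · -- pair seen before, first ending index j stored
    obtain ⟨j, hv, hj1, hjm, hpr, hmin⟩ := hD1 _ v hget
    have hDnew : DInv cs (m+1) hm := by
      refine ⟨fun p w hw => ?_, fun j' h1 h2 => ?_⟩
      · obtain ⟨j2, h⟩ := hD1 p w hw; exact ⟨j2, h.1, h.2.1, by omega, h.2.2.2⟩
      · rcases Nat.lt_or_ge j' m with h | h
        · exact hD2 j' h1 h
        · have : j' = m := by omega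
          rw [this, hget]; rfl
    show DInv cs (m+1) (if 1 < |v - (m:Int)| then (hm, true) else (hm, dp)).1 ∧
      ((if 1 < |v - (m:Int)| then (hm, true) else (hm, dp)).2 = true ↔ PairB cs (m+1))
    by_cases hcond : 1 < |v - (m:Int)|
    · rw [if_pos hcond]
      refine ⟨hDnew, ?_⟩
      have hjlt : j + 1 < m := by
        rw [hv, abs_sub_comm, abs_of_nonneg (by omega : (0:Int) ≤ (m:Int) - (j:Int))] at hcond
        omega
      simp only [true_iff]
      exact ⟨j - 1, m - 1, by omega, by omega, by rw [hpr]⟩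
    · rw [if_neg hcond]
      refine ⟨hDnew, ?_⟩
      rw [hdp]
      constructor
      · rintro ⟨a, b, hab, hbm, heq⟩; exact ⟨a, b, hab, by omega, heq⟩
      · rintro ⟨a, b, hab, hbm, heq⟩
        rcases Nat.lt_or_ge (b + 2) (m + 1) with h | h
        · exact ⟨a, b, hab, by omega, heq⟩
        · exfalso
          have hb : b = m - 1 := by omega
          have hja : j ≤ a + 1 := by
            by_contra hlt
            exact hmin (a+1) (by omega) (by omega) (by rw [Nat.add_sub_cancel, heq, hb])
          apply hcond
          rw [hv, abs_sub_comm, abs_of_nonneg (by omega : (0:Int) ≤ (m:Int) - (j:Int))]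
          have : a + 2 ≤ m - 1 := by omega
          omega

lemma inv_step (cs : List Char) (m : Nat) (hmn : m < cs.length)
    (st : Bool × PySem.Dict (List Char) Int × Bool) (h : AStInv cs m st) :
    AStInv cs (m + 1) (niceStep cs st ((m : Int), cs[m])) := by
  obtain ⟨hdl, hD, hdp⟩ := h
  have hd := hd_step cs m st.2.1 st.2.2 hD hdp
  exact ⟨dl_step cs m hmn st.1 hdl, hd.1, hd.2⟩

lemma inv_fold (cs : List Char) : ∀ m, m ≤ cs.length →
    AStInv cs m ((PySem.List.enumerate (cs.take m) 0).foldl (niceStep cs)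
      (false, PySem.Dict.empty, false)) := by
  intro m
  induction m with
  | zero =>
    intro _
    simp only [List.take_zero, PySem.List.enumerate_nil, List.foldl_nil]
    refine ⟨?_, ⟨fun p v hv => ?_, fun j hj1 hj2 => ?_⟩, ?_⟩
    · simp only [Bool.false_eq_true, false_iff]
      rintro ⟨k, hk, _⟩; omega
    · rw [PySem.Dict.get?_empty] at hv; exact absurd hv (by simp)
    · omega
    · simp only [Bool.false_eq_true, false_iff]
      rintro ⟨a, b, _, hbm, _⟩; omega
  | succ m ih =>
    intro h
    have hmn : m < cs.length := by omega
    have ht : cs.take (m+1) = cs.take m ++ [cs[m]] := by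
      rw [List.take_add_one, List.getElem?_eq_getElem hmn]; rfl
    have hlen : (cs.take m).length = m := List.length_take_of_le (by omega)
    rw [ht, PySem.List.enumerate_append, List.foldl_append, hlen,
        PySem.List.enumerate_cons, PySem.List.enumerate_nil]
    simp only [List.foldl_cons, List.foldl_nil, zero_add]
    exact inv_step cs m hmn _ (ih (by omega))

lemma hasPair_elem (cs : List Char) (i : Nat) :
    PySem.Chars.isIn (PySem.List.slice cs (some (i : Int)) (some ((i : Int) + 2)))
      (PySem.List.slice cs (some ((i : Int) + 2)) none) = true
    ↔ ∃ j, prAt cs i <+: cs.drop (i + 2 + j) := by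
  have h2 : ((i:Int) + 2) = ((i + 2 : Nat) : Int) := by push_cast; ring
  rw [h2, PySem.List.slice_natCast, PySem.List.slice_from_natCast,
      ← PySem.Chars.exists_prefix_drop_iff_isIn, show i + 2 - i = 2 from by omega]
  constructor <;> rintro ⟨j, hj⟩ <;> refine ⟨j, ?_⟩
  · rwa [List.drop_drop] at hj
  · rwa [List.drop_drop]

lemma alt_iff (s : String) :
    is_nice_string2_alt s = true ↔
      (PairB s.toList s.toList.length ∧ RepB s.toList s.toList.length) := by
  unfold is_nice_string2_alt
  rw [Bool.and_eq_true]
  apply and_congr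
  · rw [List.any_eq_true]
    constructor
    · rintro ⟨i, hi, hin⟩
      rw [List.mem_range] at hi
      obtain ⟨j, hj⟩ := (hasPair_elem s.toList i).mp hin
      have ha : i + 2 ≤ s.toList.length := by omega
      have heq := (prAt_prefix s.toList i (i + 2 + j) ha).mp hj
      exact ⟨i, i + 2 + j, by omega, prAt_eq_len s.toList i (i + 2 + j) ha heq, heq⟩
    · rintro ⟨a, b, hab, hbn, heq⟩
      refine ⟨a, List.mem_range.mpr (by omega), (hasPair_elem s.toList a).mpr ⟨b - (a + 2), ?_⟩⟩
      rw [show a + 2 + (b - (a + 2)) = b from by omega]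
      exact (prAt_prefix s.toList a b (by omega)).mpr heq
  · rw [List.any_eq_true]
    constructor
    · rintro ⟨i, hi, hin⟩
      rw [List.mem_range] at hi
      rw [show ((i:Int) + 2) = ((i + 2 : Nat) : Int) from by push_cast; ring,
          PySem.List.pyGet?_natCast, PySem.List.pyGet?_natCast, beq_iff_eq] at hin
      exact ⟨i, by omega, hin⟩
    · rintro ⟨k, hk, he⟩
      refine ⟨k, List.mem_range.mpr (by omega), ?_⟩
      rw [show ((k:Int) + 2) = ((k + 2 : Nat) : Int) from by push_cast; ring,
          PySem.List.pyGet?_natCast, PySem.List.pyGet?_natCast, beq_iff_eq]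
      exact he

-- ===== VERDICT (by name: the statement is the Claim_ definition above) =====
theorem is_nice_string2_spec : Claim_equal_is_nice_string2 := by
  intro s _
  unfold Spec_is_nice_string2
  have hA := inv_fold s.toList s.toList.length le_rfl
  rw [List.take_length] at hA
  obtain ⟨h1, _, h3⟩ := hA
  rw [Bool.eq_iff_iff]
  unfold is_nice_string2
  simp only [Bool.and_eq_true]
  rw [alt_iff, h1, h3]
  tauto
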